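-- pv_equiv track=rewrite | github.com/chrism-la/paradigm-review | functional.py | asc_order
-- ===== SOURCE A (Python) =====
-- def asc_order(arr):
-- #1st iteration
--   '''
--   result = []
--   for subarr in arr:
--     for element in subarr:
--       result.append(element)
--       result.sort()
--   return result
--   '''
-- #Flattening using List comprehension
--   '''
--   result = [element for subarr in arr for element in subarr]
--   result.sort()
--   return result
--   '''
-- #Returning new sorted list as opposed to modifying the original
--   result = [element for subarr in arr for element in subarr]
--   sorted_list = sorted(result)
--   return sorted_list
-- ===== SOURCE B (Python) =====
-- def _merge(xs, ys):
--     i = 0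
--     j = 0
--     out = []
--     while i < len(xs) and j < len(ys):
--         if ys[j] < xs[i]:
--             out.append(ys[j])
--             j += 1
--         else:
--             out.append(xs[i])
--             i += 1
--     out.extend(xs[i:])
--     out.extend(ys[j:])
--     return out
--
--
-- def asc_order(arr):
--     runs = [sorted(sub) for sub in arr]
--     while len(runs) > 1:
--         nxt = []
--         i = 0
--         while i + 1 < len(runs):
--             nxt.append(_merge(runs[i], runs[i + 1]))
--             i += 2
--         if i < len(runs):
--             nxt.append(runs[i])
--         runs = nxt
--     return runs[0] if runs else []
-- ===== Notes on version B (the rewrite author's own statement) =====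
-- stated objective: alternative
-- what changed: A flattens everything into one list and does a single global sort; B sorts each sublist and then combines the sorted runs by repeated rounds of pairwise two-pointer merges (a bottom-up k-way merge), never sorting the flattened list.
import Mathlib
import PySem

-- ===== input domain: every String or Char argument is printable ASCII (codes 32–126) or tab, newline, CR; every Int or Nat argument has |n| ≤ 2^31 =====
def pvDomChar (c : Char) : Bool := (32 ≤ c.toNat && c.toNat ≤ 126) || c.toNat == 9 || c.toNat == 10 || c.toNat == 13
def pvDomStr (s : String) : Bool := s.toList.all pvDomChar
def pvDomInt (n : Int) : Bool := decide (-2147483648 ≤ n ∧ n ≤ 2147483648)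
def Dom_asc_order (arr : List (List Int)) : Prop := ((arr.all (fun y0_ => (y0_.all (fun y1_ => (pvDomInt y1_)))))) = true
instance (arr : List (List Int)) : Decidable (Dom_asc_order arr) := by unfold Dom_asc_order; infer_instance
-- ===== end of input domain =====

-- B replaces A's single global sort of the flattened list by sorting each sublist and
-- combining the sorted runs with rounds of pairwise two-pointer merges (objective: alternative algorithm, same result).


-- ===== PORT A =====
-- result = [element for subarr in arr for element in subarr]; return sorted(result)
def asc_order (arr : List (List Int)) : List Int :=
  let result := arr.foldl (fun acc subarr => acc ++ subarr) []
  PySem.List.sorted result (fun x => x) false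

-- ===== PORT B =====
-- the while loop of _merge: two pointers over xs and ys, smaller head first (left on ties),
-- then the leftover tail is appended
def mergeTwo : List Int → List Int → List Int
  | [], ys => ys
  | xs, [] => xs
  | x :: xs, y :: ys =>
    if y < x then y :: mergeTwo (x :: xs) ys
    else x :: mergeTwo xs (y :: ys)

-- one round of the outer while loop: merge adjacent pairs of runs (odd last run kept)
def pairUp : List (List Int) → List (List Int)
  | a :: b :: rest => mergeTwo a b :: pairUp rest
  | runs => runs

theorem pairUp_length_le (rs : List (List Int)) : (pairUp rs).length ≤ rs.length := by
  fun_induction pairUp rs with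
  | case1 a b rest ih => simp only [pairUp, List.length_cons]; omega
  | case2 runs h => exact Nat.le_refl _

-- while len(runs) > 1: runs = pairUp(runs); return runs[0] if runs else []
def mergeRounds : List (List Int) → List Int
  | [] => []
  | [r] => r
  | a :: b :: rest => mergeRounds (mergeTwo a b :: pairUp rest)
termination_by rs => rs.length
decreasing_by
  simpa using Nat.lt_succ_of_le (Nat.succ_le_succ (pairUp_length_le rest))

def asc_order_alt (arr : List (List Int)) : List Int :=
  mergeRounds (arr.map (fun sub => PySem.List.sorted sub (fun x => x) false))

-- ===== PRECONDITION & SPEC =====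
def Spec_asc_order (arr : List (List Int)) (out : List Int) : Prop := out = asc_order_alt arr
instance (arr : List (List Int)) (out : List Int) : Decidable (Spec_asc_order arr out) := by unfold Spec_asc_order; infer_instance

-- ===== CLAIM (what is proved, stated in full; the proofs are below) =====
def Claim_equal_asc_order : Prop := ∀ (arr : List (List Int)), Dom_asc_order arr → Spec_asc_order arr (asc_order arr)

-- ===== LEMMAS AND PROOFS =====

theorem mergeTwo_eq_merge (xs ys : List Int) :
    mergeTwo xs ys = List.merge xs ys (fun a b => decide (a ≤ b)) := by
  fun_induction mergeTwo xs ys with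
  | case1 ys => cases ys <;> simp
  | case2 xs h => simp
  | case3 x xs y ys h ih =>
    rw [List.merge]
    have hxy : ¬ (x ≤ y) := not_le.mpr h
    simp [hxy, ih]
  | case4 x xs y ys h ih =>
    rw [List.merge]
    have hxy : x ≤ y := not_lt.mp h
    simp [hxy, ih]

theorem mergeTwo_perm (xs ys : List Int) : (mergeTwo xs ys).Perm (xs ++ ys) := by
  rw [mergeTwo_eq_merge]; exact List.merge_perm_append _

theorem mergeTwo_pairwise {xs ys : List Int}
    (hx : xs.Pairwise (· ≤ ·)) (hy : ys.Pairwise (· ≤ ·)) :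
    (mergeTwo xs ys).Pairwise (· ≤ ·) := by
  rw [mergeTwo_eq_merge]; exact List.Pairwise.merge hx hy

theorem pairUp_flatten_perm (rs : List (List Int)) :
    (pairUp rs).flatten.Perm rs.flatten := by
  fun_induction pairUp rs with
  | case1 a b rest ih =>
    simp only [List.flatten_cons]
    have h1 : (mergeTwo a b ++ (pairUp rest).flatten).Perm ((a ++ b) ++ (pairUp rest).flatten) :=
      (mergeTwo_perm a b).append_right _
    have h2 : ((a ++ b) ++ (pairUp rest).flatten).Perm ((a ++ b) ++ rest.flatten) :=
      ih.append_left _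
    simpa [List.append_assoc] using h1.trans h2
  | case2 runs h => exact List.Perm.refl _

theorem pairUp_pairwise {rs : List (List Int)}
    (h : ∀ r ∈ rs, r.Pairwise (· ≤ ·)) :
    ∀ r ∈ pairUp rs, r.Pairwise (· ≤ ·) := by
  fun_induction pairUp rs with
  | case1 a b rest ih =>
    intro r hr
    rcases List.mem_cons.mp hr with hr | hr
    · exact hr ▸ mergeTwo_pairwise (h a (by simp)) (h b (by simp))
    · exact ih (fun r hr => h r (by simp [hr])) r hr
  | case2 runs hrs => exact h

theorem mergeRounds_flatten_perm (rs : List (List Int)) :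
    (mergeRounds rs).Perm rs.flatten := by
  fun_induction mergeRounds rs with
  | case1 => exact List.Perm.refl _
  | case2 r => simp
  | case3 a b rest ih =>
    refine ih.trans ?_
    simpa using pairUp_flatten_perm (a :: b :: rest)

theorem mergeRounds_pairwise {rs : List (List Int)}
    (h : ∀ r ∈ rs, r.Pairwise (· ≤ ·)) :
    (mergeRounds rs).Pairwise (· ≤ ·) := by
  fun_induction mergeRounds rs with
  | case1 => exact List.Pairwise.nil
  | case2 r => exact h r (by simp)
  | case3 a b rest ih => exact ih (pairUp_pairwise h)

theorem foldl_append_flatten (arr : List (List Int)) (acc : List Int) :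
    arr.foldl (fun acc subarr => acc ++ subarr) acc = acc ++ arr.flatten := by
  induction arr generalizing acc with
  | nil => simp
  | cons s t ih => simp [List.foldl, ih (acc ++ s), List.append_assoc]

theorem map_sorted_flatten_perm (arr : List (List Int)) :
    (arr.map (fun sub => PySem.List.sorted sub (fun x => x) false)).flatten.Perm arr.flatten := by
  induction arr with
  | nil => exact List.Perm.refl _
  | cons s t ih =>
    simpa using (PySem.List.sorted_perm s (fun x => x) false).append ih

-- ===== VERDICT (by name: the statement is the Claim_ definition above) =====
theorem asc_order_spec : Claim_equal_asc_order := by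
  intro arr _
  show asc_order arr = asc_order_alt arr
  unfold asc_order asc_order_alt
  rw [foldl_append_flatten, List.nil_append]
  exact PySem.List.sorted_id_eq_of_perm_of_pairwise _ _
    ((mergeRounds_flatten_perm _).trans (map_sorted_flatten_perm arr))
    (mergeRounds_pairwise (by
      intro r hr
      rcases List.mem_map.mp hr with ⟨s, _, rfl⟩
      exact PySem.List.sorted_pairwise s (fun x => x)))
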